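-- pv_equiv track=rewrite | github.com/mikaaal/goldenstat | find_cup_typos.py | is_fuzzy_match
-- ===== SOURCE A (Python) =====
-- def edit_distance(a, b):
--     """Levenshtein edit distance."""
--     if abs(len(a) - len(b)) > 2:
--         return 99
--     m, n = len(a), len(b)
--     dp = list(range(n + 1))
--     for i in range(1, m + 1):
--         prev, dp[0] = dp[0], i
--         for j in range(1, n + 1):
--             temp = dp[j]
--             dp[j] = min(dp[j] + 1, dp[j - 1] + 1, prev + (0 if a[i - 1] == b[j - 1] else 1))
--             prev = temp
--     return dp[n]
--
-- def is_fuzzy_match(parts_a, parts_b):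
--     """Check if two split names are a likely typo match.
--
--     Strict rules to avoid false positives like Peter/Peder, Larry/Carry:
--     - Both must have at least 2 parts
--     - Must have the same number of parts
--     - At least one part must match exactly
--     - Differing parts: edit distance 1 only (max 2 for parts >= 10 chars)
--     - Differing parts must start with the same character
--     - Differing parts must be at least 4 chars long
--     - Only one part may differ
--     """
--     if len(parts_a) < 2 or len(parts_b) < 2:
--         return False
--     if len(parts_a) != len(parts_b):
--         return False
--
--     exact_matches = 0
--     diff_count = 0
--
--     for pa, pb in zip(parts_a, parts_b):
--         if pa == pb:
--             exact_matches += 1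
--         else:
--             diff_count += 1
--             # Only one part may differ
--             if diff_count > 1:
--                 return False
--             # Must start with the same character
--             if pa[0] != pb[0]:
--                 return False
--             # Must be at least 4 chars
--             if max(len(pa), len(pb)) < 4:
--                 return False
--             d = edit_distance(pa, pb)
--             # Strict: max edit distance 1, or 2 for long parts (>= 10 chars)
--             max_dist = 2 if min(len(pa), len(pb)) >= 10 else 1
--             if d > max_dist:
--                 return False
--
--     return diff_count == 1 and exact_matches >= 1
-- ===== SOURCE B (Python) =====
-- def within_edits(a, b, k):
--     """Decide levenshtein(a, b) <= k by branch-and-bound recursion (k is tiny: 1 or 2).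
--
--     Strips matching trailing characters; on a mismatch tries the three edits
--     with a smaller budget. O((len(a)+len(b)) * 3^k) instead of a full DP table.
--     """
--     if abs(len(a) - len(b)) > k:
--         return False
--     if not a or not b:
--         return True
--     if a[-1] == b[-1]:
--         return within_edits(a[:-1], b[:-1], k)
--     if k == 0:
--         return False
--     return (within_edits(a[:-1], b[:-1], k - 1)
--             or within_edits(a[:-1], b, k - 1)
--             or within_edits(a, b[:-1], k - 1))
--
-- def is_fuzzy_match(parts_a, parts_b):
--     """Filter-then-validate: collect the differing pairs, demand exactly one,
--     validate it with a bounded edit-budget search instead of a DP table."""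
--     if len(parts_a) < 2 or len(parts_b) < 2 or len(parts_a) != len(parts_b):
--         return False
--     diffs = [(pa, pb) for pa, pb in zip(parts_a, parts_b) if pa != pb]
--     if len(diffs) != 1:
--         return False
--     pa, pb = diffs[0]
--     if pa[0] != pb[0] or max(len(pa), len(pb)) < 4:
--         return False
--     k = 2 if min(len(pa), len(pb)) >= 10 else 1
--     return within_edits(pa, pb, k)
-- ===== Notes on version B (the rewrite author's own statement) =====
-- stated objective: alternative
-- what changed: The early-return counting pass is replaced by filter-then-validate (collect the differing pairs of the zip, demand exactly one, then validate it; the redundant exact_matches >= 1 check disappears), and the full O(mn) dynamic-programming edit_distance table is replaced by a bounded branch-and-bound recursion within_edits(a,b,k) that strips matching trailing characters and tries the three edits with budget k-1 on a mismatch, deciding distance<=k directly in O((m+n)*3^k) with k<=2.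
import Mathlib
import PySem

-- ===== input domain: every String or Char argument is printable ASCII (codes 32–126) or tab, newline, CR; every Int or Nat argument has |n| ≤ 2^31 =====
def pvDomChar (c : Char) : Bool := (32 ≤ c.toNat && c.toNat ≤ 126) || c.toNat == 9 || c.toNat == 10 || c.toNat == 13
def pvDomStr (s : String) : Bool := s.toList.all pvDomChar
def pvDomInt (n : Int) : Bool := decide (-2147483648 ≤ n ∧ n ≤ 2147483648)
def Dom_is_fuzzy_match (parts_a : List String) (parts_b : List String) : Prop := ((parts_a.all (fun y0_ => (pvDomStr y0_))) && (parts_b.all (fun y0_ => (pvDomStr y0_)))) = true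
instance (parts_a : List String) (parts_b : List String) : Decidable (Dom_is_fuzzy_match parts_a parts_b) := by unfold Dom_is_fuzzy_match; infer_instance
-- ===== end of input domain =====

-- B replaces A's early-return counting pass by filter-then-validate (collect the differing
-- pairs, demand exactly one, validate it) and replaces the full DP edit_distance table by a
-- bounded branch-and-bound recursion deciding distance ≤ k directly; objective: alternative.

-- ===== PORT A =====
-- inner j-loop of edit_distance: state = (remaining chars of b, prev, dp[j-1] of the new row, dp[j..] of the old row)
def pvInnerRow (ca : Char) : List Char → Int → Int → List Int → List Int
  | [], _, _, _ => []
  | _ :: _, _, _, [] => []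
  | cb :: bs, prev, left, o :: os =>
      let v := min (o + 1) (min (left + 1) (prev + (if ca == cb then 0 else 1)))
      v :: pvInnerRow ca bs o v os

-- outer i-loop: dp := i :: new row
def pvRowsA : List Char → List Char → Int → List Int → List Int
  | [], _, _, dp => dp
  | _ :: _, _, _, [] => []
  | ca :: as_, lb, i, d0 :: drest => pvRowsA as_ lb (i + 1) (i :: pvInnerRow ca lb d0 i drest)

def edit_distance (a b : String) : Int :=
  let la := a.toList
  let lb := b.toList
  if 2 < ((la.length : Int) - (lb.length : Int)).natAbs then 99
  else
    let n := lb.length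
    let dp := pvRowsA la lb 1 ((List.range (n + 1)).map Int.ofNat)
    (PySem.List.pyGet? dp (n : Int)).getD 0

-- the for-loop of A with state (exact_matches, diff_count) and early returns
def pvLoopA : List (String × String) → Int → Int → Bool
  | [], exact, diff => decide (diff = 1 ∧ 1 ≤ exact)
  | (pa, pb) :: rest, exact, diff =>
      if pa == pb then pvLoopA rest (exact + 1) diff
      else
        let diff' := diff + 1
        if 1 < diff' then false
        else if PySem.Str.pyGet? pa 0 ≠ PySem.Str.pyGet? pb 0 then false
        else if max pa.toList.length pb.toList.length < 4 then false
        else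
          let d := edit_distance pa pb
          let max_dist : Int := if 10 ≤ min pa.toList.length pb.toList.length then 2 else 1
          if max_dist < d then false else pvLoopA rest exact diff'

def is_fuzzy_match (parts_a : List String) (parts_b : List String) : Bool :=
  if parts_a.length < 2 ∨ parts_b.length < 2 then false
  else if parts_a.length ≠ parts_b.length then false
  else pvLoopA (parts_a.zip parts_b) 0 0

-- ===== PORT B =====
-- Source B's within_edits strips TRAILING characters (a[-1], a[:-1]); on the reversed character
-- list these are exactly head and tail, so the port recurses on reversed lists — exact.
def pvWithin : List Char → List Char → Int → Bool
  | s, t, k =>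
    if (((s.length : Int) - (t.length : Int)).natAbs : Int) > k then false
    else
      match s, t with
      | [], _ => true
      | _ :: _, [] => true
      | c :: s', d :: t' =>
          if c = d then pvWithin s' t' k
          else if k = 0 then false
          else pvWithin s' t' (k - 1) || pvWithin s' (d :: t') (k - 1) || pvWithin (c :: s') t' (k - 1)
  termination_by s t _ => s.length + t.length

def is_fuzzy_match_alt (parts_a : List String) (parts_b : List String) : Bool :=
  if parts_a.length < 2 ∨ parts_b.length < 2 ∨ parts_a.length ≠ parts_b.length then false
  else
    match (parts_a.zip parts_b).filter (fun q => q.1 != q.2) with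
    | [(x, y)] =>
        if PySem.Str.pyGet? x 0 ≠ PySem.Str.pyGet? y 0 ∨ max x.toList.length y.toList.length < 4 then false
        else
          let k : Int := if 10 ≤ min x.toList.length y.toList.length then 2 else 1
          pvWithin x.toList.reverse y.toList.reverse k
    | _ => false

-- ===== PRECONDITION & SPEC =====
-- the differing pairs of zip(parts_a, parts_b), in order (head = first differing pair)
def pvDiffs (parts_a : List String) (parts_b : List String) : List (String × String) :=
  (parts_a.zip parts_b).filter (fun q => q.1 != q.2)

-- Pre_ excludes exactly the inputs where Python A raises IndexError: the length guards pass and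
-- the first differing pair contains an empty string (pa[0]/pb[0] on "").
def Pre_is_fuzzy_match (parts_a : List String) (parts_b : List String) : Prop :=
  (2 ≤ parts_a.length ∧ 2 ≤ parts_b.length ∧ parts_a.length = parts_b.length) →
    Option.all (fun q => q.1 != "" && q.2 != "") (pvDiffs parts_a parts_b).head? = true
instance (parts_a : List String) (parts_b : List String) : Decidable (Pre_is_fuzzy_match parts_a parts_b) := by
  unfold Pre_is_fuzzy_match; infer_instance

def pvWitness_is_fuzzy_match : List String × List String := (["anna", "berg"], ["anna", "borg"])

def Spec_is_fuzzy_match (parts_a : List String) (parts_b : List String) (out : Bool) : Prop := out = is_fuzzy_match_alt parts_a parts_b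
instance (parts_a : List String) (parts_b : List String) (out : Bool) : Decidable (Spec_is_fuzzy_match parts_a parts_b out) := by unfold Spec_is_fuzzy_match; infer_instance

-- ===== CLAIM (what is proved, stated in full; the proofs are below) =====
def Claim_equal_is_fuzzy_match : Prop := ∀ (parts_a : List String) (parts_b : List String), Dom_is_fuzzy_match parts_a parts_b → Pre_is_fuzzy_match parts_a parts_b → Spec_is_fuzzy_match parts_a parts_b (is_fuzzy_match parts_a parts_b)


-- ===== LEMMAS AND PROOFS =====

def lev : List Char → List Char → Nat
  | [], t => t.length
  | _ :: ss, [] => ss.length + 1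
  | x :: s, y :: t =>
      if x = y then lev s t
      else 1 + min (lev s t) (min (lev (x :: s) t) (lev s (y :: t)))
  termination_by s t => s.length + t.length

theorem lev_nil_right (s : List Char) : lev s [] = s.length := by
  cases s <;> simp [lev]

theorem lev_cons_cons (x y : Char) (s t : List Char) :
    lev (x :: s) (y :: t) =
      if x = y then lev s t
      else 1 + min (lev s t) (min (lev (x :: s) t) (lev s (y :: t))) := by
  rw [lev]

theorem lev_diff_le : ∀ (n : Nat) (s t : List Char), s.length + t.length ≤ n →
    t.length ≤ s.length + lev s t ∧ s.length ≤ t.length + lev s t := by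
  intro n
  induction n with
  | zero =>
    intro s t h
    have hs : s = [] := by cases s <;> simp_all
    have ht : t = [] := by cases t <;> simp_all
    subst hs; subst ht; simp [lev]
  | succ n ih =>
    intro s t h
    match s, t with
    | [], t => simp [lev]
    | x :: s, [] => simp [lev_nil_right]
    | x :: s, y :: t =>
      simp only [List.length_cons] at h ⊢
      have h1 := ih s t (by omega)
      have h2 := ih (x :: s) t (by simp at h ⊢; omega)
      have h3 := ih s (y :: t) (by simp at h ⊢; omega)
      simp only [List.length_cons] at h2 h3
      by_cases hxy : x = y
      · simp only [lev, if_pos hxy]; omega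
      · simp only [lev, if_neg hxy]; omega

theorem lev_le_sum : ∀ (n : Nat) (s t : List Char), s.length + t.length ≤ n →
    lev s t ≤ s.length + t.length := by
  intro n
  induction n with
  | zero =>
    intro s t h
    have hs : s = [] := by cases s <;> simp_all
    have ht : t = [] := by cases t <;> simp_all
    subst hs; subst ht; simp [lev]
  | succ n ih =>
    intro s t h
    match s, t with
    | [], t => simp [lev]
    | x :: s, [] => simp [lev_nil_right]
    | x :: s, y :: t =>
      simp only [List.length_cons] at h ⊢
      have h1 := ih s t (by omega)
      by_cases hxy : x = y
      · rw [lev_cons_cons, if_pos hxy]; omega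
      · rw [lev_cons_cons, if_neg hxy]; omega

theorem lev_adj : ∀ (n : Nat) (s t : List Char), s.length + t.length ≤ n →
    (∀ x, lev s t ≤ lev (x :: s) t + 1) ∧ (∀ y, lev s t ≤ lev s (y :: t) + 1) ∧
    (∀ x, lev (x :: s) t ≤ lev s t + 1) ∧ (∀ y, lev s (y :: t) ≤ lev s t + 1) := by
  intro n
  induction n with
  | zero =>
    intro s t h
    have hs : s = [] := by cases s <;> simp_all
    have ht : t = [] := by cases t <;> simp_all
    subst hs; subst ht
    refine ⟨fun x => ?_, fun y => ?_, fun x => ?_, fun y => ?_⟩ <;> simp [lev]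
  | succ n ih =>
    intro s t h
    match s, t with
    | [], t =>
      refine ⟨fun x => ?_, fun y => ?_, fun x => ?_, fun y => ?_⟩
      · have := (lev_diff_le ((x :: ([] : List Char)).length + t.length) (x :: []) t le_rfl).1
        simp only [List.length_cons, List.length_nil] at this
        simp only [lev]; omega
      · simp only [lev, List.length_cons]; omega
      · have := lev_le_sum ((x :: ([] : List Char)).length + t.length) (x :: []) t le_rfl
        simp only [List.length_cons, List.length_nil] at this
        simp only [lev]; omega
      · simp [lev]
    | x :: s, [] =>
      refine ⟨fun x' => ?_, fun y => ?_, fun x' => ?_, fun y => ?_⟩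
      · simp [lev_nil_right]
      · have := (lev_diff_le ((x :: s).length + ([y] : List Char).length) (x :: s) [y] le_rfl).2
        simp only [List.length_cons, List.length_nil] at this
        simp [lev_nil_right]; omega
      · simp [lev_nil_right]
      · have := lev_le_sum ((x :: s).length + ([y] : List Char).length) (x :: s) [y] le_rfl
        simp only [List.length_cons, List.length_nil] at this
        simp [lev_nil_right]; omega
    | x :: s, y :: t =>
      simp only [List.length_cons] at h
      have B := ih (x :: s) t (by simp; omega)
      have C := ih s (y :: t) (by simp; omega)
      refine ⟨fun x' => ?_, fun y' => ?_, fun x' => ?_, fun y' => ?_⟩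
      · -- lev (x::s)(y::t) ≤ lev (x'::x::s)(y::t) + 1
        rw [lev_cons_cons x' y (x :: s) t]
        by_cases hxy : x' = y
        · rw [if_pos hxy]; exact B.2.2.2 y
        · rw [if_neg hxy]
          have f1 := B.2.2.2 y
          have f2 := B.1 x'
          omega
      · -- lev (x::s)(y::t) ≤ lev (x::s)(y'::y::t) + 1
        rw [lev_cons_cons x y' s (y :: t)]
        by_cases hxy : x = y'
        · rw [if_pos hxy]; exact C.2.2.1 x
        · rw [if_neg hxy]
          have f1 := C.2.2.1 x
          have f2 := C.2.1 y'
          omega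
      · -- lev (x'::x::s)(y::t) ≤ lev (x::s)(y::t) + 1
        rw [lev_cons_cons x' y (x :: s) t]
        by_cases hxy : x' = y
        · rw [if_pos hxy]; exact B.2.1 y
        · rw [if_neg hxy]; omega
      · -- lev (x::s)(y'::y::t) ≤ lev (x::s)(y::t) + 1
        rw [lev_cons_cons x y' s (y :: t)]
        by_cases hxy : x = y'
        · rw [if_pos hxy]; exact C.1 x
        · rw [if_neg hxy]; omega

theorem lev_cell (x y : Char) (s t : List Char) :
    lev (x :: s) (y :: t) =
      min (lev s (y :: t) + 1) (min (lev (x :: s) t + 1) (lev s t + (if x = y then 0 else 1))) := by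
  have A := lev_adj (s.length + t.length) s t le_rfl
  have p1 := A.1 x
  have p2 := A.2.1 y
  rw [lev_cons_cons]
  by_cases hxy : x = y
  · rw [if_pos hxy, if_pos hxy]; omega
  · rw [if_neg hxy, if_neg hxy]; omega

theorem pvWithin_eq (s t : List Char) (k : Int) :
    pvWithin s t k =
      if (((s.length : Int) - (t.length : Int)).natAbs : Int) > k then false
      else
        match s, t with
        | [], _ => true
        | _ :: _, [] => true
        | c :: s', d :: t' =>
            if c = d then pvWithin s' t' k
            else if k = 0 then false
            else pvWithin s' t' (k - 1) || pvWithin s' (d :: t') (k - 1) || pvWithin (c :: s') t' (k - 1) := by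
  rw [pvWithin.eq_def]

theorem within_spec : ∀ (n : Nat) (s t : List Char) (k : Int), s.length + t.length ≤ n → 0 ≤ k →
    pvWithin s t k = decide ((lev s t : Nat) ≤ k) := by
  intro n
  induction n with
  | zero =>
    intro s t k h hk
    have hs : s = [] := by cases s <;> simp_all
    have ht : t = [] := by cases t <;> simp_all
    subst hs; subst ht
    rw [pvWithin_eq]
    simp [lev, hk]
  | succ n ih =>
    intro s t k h hk
    rw [pvWithin_eq]
    by_cases hg : (((((s.length : Int) - (t.length : Int)).natAbs : Nat) : Int) > k)
    · rw [if_pos hg]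
      have hd := lev_diff_le (s.length + t.length) s t le_rfl
      symm
      simp only [decide_eq_false_iff_not]
      omega
    · rw [if_neg hg]
      match s, t with
      | [], t =>
        show true = decide ((lev [] t : Nat) ≤ k)
        simp only [lev]
        symm
        simp only [decide_eq_true_eq]
        simp only [List.length_nil] at hg
        omega
      | c :: s', [] =>
        show true = decide ((lev (c :: s') [] : Nat) ≤ k)
        simp only [lev_nil_right, List.length_cons]
        symm
        simp only [decide_eq_true_eq]
        simp only [List.length_nil, List.length_cons] at hg
        omega
      | c :: s', d :: t' =>
        show (if c = d then pvWithin s' t' k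
              else if k = 0 then false
              else pvWithin s' t' (k - 1) || pvWithin s' (d :: t') (k - 1) || pvWithin (c :: s') t' (k - 1))
            = decide ((lev (c :: s') (d :: t') : Nat) ≤ k)
        simp only [List.length_cons] at h
        by_cases hcd : c = d
        · rw [if_pos hcd, ih s' t' k (by omega) hk, lev_cons_cons, if_pos hcd]
        · rw [if_neg hcd, lev_cons_cons, if_neg hcd]
          by_cases hk0 : k = 0
          · subst hk0
            rw [if_pos rfl]
            symm
            simp only [decide_eq_false_iff_not]
            push_cast
            omega
          · rw [if_neg hk0]
            rw [ih s' t' (k - 1) (by omega) (by omega),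
                ih s' (d :: t') (k - 1) (by simp only [List.length_cons]; omega) (by omega),
                ih (c :: s') t' (k - 1) (by simp only [List.length_cons]; omega) (by omega)]
            rw [← Bool.decide_or, ← Bool.decide_or, decide_eq_decide]
            push_cast
            omega

def levRow (ra : List Char) : List Char → List Char → List Int
  | _, [] => []
  | rb, cb :: bs => ((lev ra (cb :: rb) : Nat) : Int) :: levRow ra (cb :: rb) bs

theorem innerRow_spec (ca : Char) (ra : List Char) :
    ∀ (bs rb : List Char),
      pvInnerRow ca bs ((lev ra rb : Nat) : Int) ((lev (ca :: ra) rb : Nat) : Int) (levRow ra rb bs)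
        = levRow (ca :: ra) rb bs := by
  intro bs
  induction bs with
  | nil => intro rb; simp [pvInnerRow, levRow]
  | cons cb bs ih =>
    intro rb
    rw [levRow, levRow, pvInnerRow]
    have hv : min (((lev ra (cb :: rb) : Nat) : Int) + 1)
        (min (((lev (ca :: ra) rb : Nat) : Int) + 1)
          (((lev ra rb : Nat) : Int) + (if ca == cb then 0 else 1)))
        = ((lev (ca :: ra) (cb :: rb) : Nat) : Int) := by
      rw [lev_cell ca cb ra rb]
      by_cases hcc : ca = cb
      · simp only [hcc, beq_self_eq_true, if_pos, if_true]
        push_cast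
        omega
      · have hb : (ca == cb) = false := by simp [hcc]
        simp only [hb, if_neg hcc, Bool.false_eq_true, if_false]
        push_cast
        omega
    simp only [hv]
    exact congrArg _ (ih (cb :: rb))

theorem rowsA_spec : ∀ (as_ ra lb : List Char),
    pvRowsA as_ lb (((lev ra [] : Nat) : Int) + 1) (((lev ra [] : Nat) : Int) :: levRow ra [] lb)
      = ((lev (as_.reverse ++ ra) [] : Nat) : Int) :: levRow (as_.reverse ++ ra) [] lb := by
  intro as_
  induction as_ with
  | nil => intro ra lb; simp [pvRowsA]
  | cons ca as_ ih =>
    intro ra lb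
    rw [pvRowsA]
    have heq : ((lev ra [] : Nat) : Int) + 1 = ((lev (ca :: ra) [] : Nat) : Int) := by
      rw [lev_nil_right, lev_nil_right]; simp only [List.length_cons]; push_cast; ring
    rw [heq, innerRow_spec ca ra lb [], ih (ca :: ra) lb]
    have h4 : as_.reverse ++ (ca :: ra) = (ca :: as_).reverse ++ ra := by simp
    rw [h4]

theorem levRow_nil_left : ∀ (bs rb : List Char),
    levRow [] rb bs = (List.range bs.length).map (fun j => ((rb.length + 1 + j : Nat) : Int)) := by
  intro bs
  induction bs with
  | nil => intro rb; simp [levRow]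
  | cons cb bs ih =>
    intro rb
    rw [levRow, ih (cb :: rb)]
    simp only [List.length_cons]
    rw [List.range_succ_eq_map, List.map_cons, List.map_map]
    have hh : lev [] (cb :: rb) = rb.length + 1 := by simp [lev]
    rw [hh]
    refine List.cons_eq_cons.mpr ⟨by norm_num, ?_⟩
    apply List.map_congr_left
    intro a _
    simp only [Function.comp_apply]
    congr 1
    omega

theorem init_row (lb : List Char) :
    (List.range (lb.length + 1)).map Int.ofNat = ((0 : Nat) : Int) :: levRow [] [] lb := by
  rw [levRow_nil_left lb []]
  rw [List.range_succ_eq_map, List.map_cons, List.map_map]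
  refine List.cons_eq_cons.mpr ⟨rfl, ?_⟩
  apply List.map_congr_left
  intro a _
  simp only [Function.comp_apply, List.length_nil, Int.ofNat_eq_natCast]
  congr 1
  omega

theorem levRow_get (ra : List Char) : ∀ (bs rb : List Char) (d0 : Int), d0 = ((lev ra rb : Nat) : Int) →
    (d0 :: levRow ra rb bs)[bs.length]? = some ((lev ra (bs.reverse ++ rb) : Nat) : Int) := by
  intro bs
  induction bs with
  | nil => intro rb d0 h; simp [levRow, h]
  | cons cb bs ih =>
    intro rb d0 h
    rw [levRow]
    simp only [List.length_cons, List.getElem?_cons_succ]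
    rw [ih (cb :: rb) _ rfl]
    congr 1
    simp

theorem edit_distance_eq (a b : String) :
    edit_distance a b =
      if 2 < ((a.toList.length : Int) - (b.toList.length : Int)).natAbs then 99
      else ((lev a.toList.reverse b.toList.reverse : Nat) : Int) := by
  simp only [edit_distance]
  by_cases hg : 2 < ((a.toList.length : Int) - (b.toList.length : Int)).natAbs
  · rw [if_pos hg, if_pos hg]
  · rw [if_neg hg, if_neg hg]
    have h1 : (1 : Int) = ((lev ([] : List Char) ([] : List Char) : Nat) : Int) + 1 := by
      simp [lev]
    have h0 : ((0 : Nat) : Int) = ((lev ([] : List Char) ([] : List Char) : Nat) : Int) := by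
      simp [lev]
    rw [init_row b.toList, h1, h0, rowsA_spec a.toList [] b.toList]
    rw [PySem.List.pyGet?_natCast]
    rw [levRow_get (a.toList.reverse ++ []) b.toList [] _ rfl]
    simp

theorem ed_within (x y : String) (k : Int) (h0 : 0 ≤ k) (h2 : k ≤ 2) :
    decide (edit_distance x y ≤ k) = pvWithin x.toList.reverse y.toList.reverse k := by
  rw [edit_distance_eq,
      within_spec (x.toList.reverse.length + y.toList.reverse.length) _ _ k le_rfl h0]
  by_cases hg : 2 < ((x.toList.length : Int) - (y.toList.length : Int)).natAbs
  · rw [if_pos hg]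
    have hd := lev_diff_le (x.toList.reverse.length + y.toList.reverse.length) x.toList.reverse y.toList.reverse le_rfl
    simp only [List.length_reverse] at hd
    have l1 : ¬ ((99 : Int) ≤ k) := by omega
    have l2 : ¬ (((lev x.toList.reverse y.toList.reverse : Nat) : Int) ≤ k) := by omega
    rw [decide_eq_false l1, decide_eq_false l2]
  · rw [if_neg hg]

-- A's loop once one differing pair has been accepted (diff_count = 1): any further difference
-- returns False, otherwise the verdict is exact_matches >= 1 with every remaining equal pair counted.
theorem pvLoopA_one (l : List (String × String)) : ∀ (e : Int),
    pvLoopA l e 1 =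
      ((l.filter (fun q => q.1 != q.2)).isEmpty &&
        decide (1 ≤ e + ((l.filter (fun q => q.1 == q.2)).length : Int))) := by
  induction l with
  | nil => intro e; simp [pvLoopA]
  | cons p l ih =>
    intro e
    obtain ⟨pa, pb⟩ := p
    by_cases h : pa = pb
    · subst h
      have heq : (pa == pa) = true := by simp
      simp only [pvLoopA, heq, if_pos]
      rw [ih (e + 1)]
      simp only [List.filter_cons, bne_self_eq_false, Bool.false_eq_true, if_neg, beq_self_eq_true,
        if_pos, List.length_cons, not_false_eq_true]
      congr 1
      rw [decide_eq_decide]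
      push_cast
      omega
    · have hne : (pa == pb) = false := by simp [h]
      simp [pvLoopA, hne, h]

-- A's loop from the start, characterised by the list of differing pairs.
theorem pvLoopA_zero (l : List (String × String)) : ∀ (e : Int),
    pvLoopA l e 0 =
      (match l.filter (fun q => q.1 != q.2) with
       | [] => false
       | (x, y) :: rest =>
          if PySem.Str.pyGet? x 0 ≠ PySem.Str.pyGet? y 0 then false
          else if max x.toList.length y.toList.length < 4 then false
          else if (if 10 ≤ min x.toList.length y.toList.length then (2 : Int) else 1) < edit_distance x y then false
          else rest.isEmpty && decide (1 ≤ e + ((l.filter (fun q => q.1 == q.2)).length : Int))) := by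
  induction l with
  | nil => intro e; simp [pvLoopA]
  | cons p l ih =>
    intro e
    obtain ⟨pa, pb⟩ := p
    by_cases h : pa = pb
    · subst h
      have heq : (pa == pa) = true := by simp
      simp only [pvLoopA, heq, if_pos]
      rw [ih (e + 1)]
      simp only [List.filter_cons, bne_self_eq_false, Bool.false_eq_true, if_neg, beq_self_eq_true,
        if_pos, List.length_cons, not_false_eq_true]
      have hdec : decide (1 ≤ e + 1 + ((List.filter (fun q => q.1 == q.2) l).length : Int))
                = decide (1 ≤ e + (((List.filter (fun q => q.1 == q.2) l).length : Nat) + 1 : Nat)) := by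
        rw [decide_eq_decide]; push_cast; omega
      rw [hdec]
    · have hne : (pa == pb) = false := by simp [h]
      have hfc : List.filter (fun q => q.1 != q.2) ((pa, pb) :: l)
               = (pa, pb) :: List.filter (fun q => q.1 != q.2) l := by
        simp [List.filter_cons, h]
      simp only [pvLoopA, hne, Bool.false_eq_true, if_neg, not_false_eq_true, hfc]
      have h2 : ¬ ((1 : Int) < 0 + 1) := by omega
      simp only [h2, if_neg, not_false_eq_true]
      have h01 : (0 : Int) + 1 = 1 := by ring
      rw [h01, pvLoopA_one l e]
      simp [h]

-- equal + differing pairs partition the zip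
theorem pv_filter_partition (l : List (String × String)) :
    (l.filter (fun q => q.1 == q.2)).length + (l.filter (fun q => q.1 != q.2)).length = l.length := by
  induction l with
  | nil => rfl
  | cons p l ih =>
    by_cases h : p.1 = p.2 <;> simp [List.filter_cons, h] <;> omega

-- ===== VERDICT (by name: the statement is the Claim_ definition above) =====
theorem is_fuzzy_match_spec : Claim_equal_is_fuzzy_match := by
  intro pa pb _ _
  unfold Spec_is_fuzzy_match is_fuzzy_match is_fuzzy_match_alt
  by_cases h1 : pa.length < 2 ∨ pb.length < 2
  · rw [if_pos h1, if_pos (by tauto : pa.length < 2 ∨ pb.length < 2 ∨ pa.length ≠ pb.length)]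
  · by_cases h2 : pa.length = pb.length
    · have hc : ¬ (pa.length < 2 ∨ pb.length < 2 ∨ pa.length ≠ pb.length) := by
        push_neg at h1 ⊢; exact ⟨h1.1, h1.2, h2⟩
      rw [if_neg h1, if_neg (by omega : ¬ pa.length ≠ pb.length), if_neg hc]
      rw [pvLoopA_zero]
      cases hf : (pa.zip pb).filter (fun q => q.1 != q.2) with
      | nil => simp
      | cons q rest =>
        obtain ⟨x, y⟩ := q
        cases rest with
        | nil =>
          rcases not_or.mp h1 with ⟨ha2, hb2⟩
          have hzip : (pa.zip pb).length = pa.length := by simp [List.length_zip, h2]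
          have hpart := pv_filter_partition (pa.zip pb)
          rw [hf] at hpart
          have hcnt : (1 : Int) ≤ 0 + ((List.filter (fun q => q.1 == q.2) (pa.zip pb)).length : Int) := by
            simp only [List.length_cons, List.length_nil] at hpart
            omega
          have hLtrue : decide ((1 : Int) ≤ 0 + ((List.filter (fun q => q.1 == q.2) (pa.zip pb)).length : Int)) = true :=
            decide_eq_true hcnt
          simp only [List.isEmpty_nil, Bool.true_and, hLtrue]
          by_cases c1 : PySem.Str.pyGet? x 0 = PySem.Str.pyGet? y 0
          · by_cases c2 : max x.toList.length y.toList.length < 4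
            · rw [if_neg (not_not_intro c1), if_pos c2, if_pos (Or.inr c2)]
            · rw [if_neg (not_not_intro c1), if_neg c2,
                if_neg (by tauto : ¬ (PySem.Str.pyGet? x 0 ≠ PySem.Str.pyGet? y 0 ∨ max x.toList.length y.toList.length < 4))]
              have hk : (0 : Int) ≤ (if 10 ≤ min x.toList.length y.toList.length then (2 : Int) else 1) ∧
                        (if 10 ≤ min x.toList.length y.toList.length then (2 : Int) else 1) ≤ 2 := by
                split_ifs <;> omega
              rw [← ed_within x y _ hk.1 hk.2]
              by_cases c3 : (if 10 ≤ min x.toList.length y.toList.length then (2 : Int) else 1) < edit_distance x y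
              · rw [if_pos c3, eq_comm, decide_eq_false_iff_not]; omega
              · rw [if_neg c3, eq_comm, decide_eq_true_eq]; omega
          · rw [if_pos c1, if_pos (Or.inl c1)]
        | cons q2 rest2 =>
          simp only [List.isEmpty_cons, Bool.false_and]
          split_ifs <;> rfl
    · rw [if_neg h1, if_pos h2, if_pos (Or.inr (Or.inr h2) : pa.length < 2 ∨ pb.length < 2 ∨ pa.length ≠ pb.length)]
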